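-- pv_equiv track=rewrite | github.com/dice-group/OSIER | osier/join.py | align_size_of_virtual_table
-- ===== SOURCE A (Python) =====
-- def align_size_of_virtual_table(virtual_table):
--     virtual_header = []
--     for _header_item in virtual_table.keys():
--         _header_tuple = (_header_item, len(virtual_table[_header_item]))
--         virtual_header.append(_header_tuple)
--     virtual_header = sorted(virtual_header, key=lambda x: x[1], reverse=True)
--     prev_length = None
--     for (_key, length) in virtual_header:
--         current_length = len(virtual_table[_key])
--         if prev_length:
--             if current_length < prev_length:
--                 virtual_table[_key] += [None]*(prev_length - current_length)
--         prev_length = len(virtual_table[_key])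
--     return virtual_table
-- ===== SOURCE B (Python) =====
-- def align_size_of_virtual_table(virtual_table):
--     m = max((len(v) for v in virtual_table.values()), default=0)
--     for col in virtual_table.values():
--         col += [None] * (m - len(col))
--     return virtual_table
-- ===== Notes on version B (the rewrite author's own statement) =====
-- stated objective: simpler
-- what changed: B replaces A's sort-by-length-descending pass and rolling prev_length bookkeeping with a single max() over the column lengths followed by one pass that pads every shorter column to that maximum.
import Mathlib
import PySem

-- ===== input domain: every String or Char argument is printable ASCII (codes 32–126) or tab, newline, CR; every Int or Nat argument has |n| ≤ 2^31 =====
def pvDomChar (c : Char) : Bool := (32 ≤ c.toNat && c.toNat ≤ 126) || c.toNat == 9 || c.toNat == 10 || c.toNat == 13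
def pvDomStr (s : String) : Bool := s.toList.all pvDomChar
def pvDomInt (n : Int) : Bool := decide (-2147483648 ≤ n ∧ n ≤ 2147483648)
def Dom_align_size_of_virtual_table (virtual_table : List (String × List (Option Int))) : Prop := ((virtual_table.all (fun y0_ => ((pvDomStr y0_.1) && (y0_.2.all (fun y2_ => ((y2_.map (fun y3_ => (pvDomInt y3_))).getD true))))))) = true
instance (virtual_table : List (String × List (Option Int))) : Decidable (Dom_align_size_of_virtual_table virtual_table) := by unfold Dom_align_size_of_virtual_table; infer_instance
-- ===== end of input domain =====

-- B pads every column to the maximum column length found in one pass, instead of A's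
-- sort-by-length-descending plus rolling prev_length bookkeeping (objective: simpler).
-- Both Pythons mutate the input dict's column lists in place and return the same dict
-- object; the equivalence proved here is about the returned value.

-- ===== PORT A =====
-- A-side helper: the body of A's second loop (`for (_key, length) in virtual_header: …`).
def pvPadStep (st : PySem.Dict String (List (Option Int)) × Option Int) (kv : String × Int) :
    PySem.Dict String (List (Option Int)) × Option Int :=
  let d := st.1
  let current : Int := PySem.List.len (d.getD kv.1 [])    -- current_length = len(virtual_table[_key])
  let d' := match st.2 with
    | none => d                                            -- `if prev_length:` — None is falsy
    | some p =>
      if p ≠ 0 then                                        -- `if prev_length:` — 0 is falsy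
        if current < p then
          -- virtual_table[_key] += [None]*(prev_length - current_length)
          d.modify kv.1 [] (fun v => v ++ PySem.List.pyRepeat [none] (p - current))
        else d
      else d
  (d', some (PySem.List.len (d'.getD kv.1 [])))            -- prev_length = len(virtual_table[_key])

def align_size_of_virtual_table (virtual_table : List (String × List (Option Int))) : List (String × List (Option Int)) :=
  let d0 : PySem.Dict String (List (Option Int)) := PySem.Dict.mk virtual_table
  -- virtual_header = []; for _header_item in keys: append (_header_item, len(vt[_header_item]))
  let virtual_header : List (String × Int) :=
    d0.keys.foldl (fun acc k => acc ++ [(k, PySem.List.len (d0.getD k []))]) []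
  -- virtual_header = sorted(virtual_header, key=lambda x: x[1], reverse=True)
  let virtual_header := PySem.List.sorted virtual_header (fun x => x.2) true
  -- prev_length = None; for (_key, length) in virtual_header: …
  let st := virtual_header.foldl pvPadStep (d0, none)
  st.1.items

-- ===== PORT B =====
def align_size_of_virtual_table_alt (virtual_table : List (String × List (Option Int))) : List (String × List (Option Int)) :=
  -- m = max((len(v) for v in virtual_table.values()), default=0)
  let m : Int := PySem.List.maxD (virtual_table.map (fun p => PySem.List.len p.2)) (fun x => x) 0
  -- for col in virtual_table.values(): col += [None] * (m - len(col))
  virtual_table.map (fun p => (p.1, p.2 ++ PySem.List.pyRepeat [none] (m - PySem.List.len p.2)))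

-- ===== PRECONDITION & SPEC =====
-- Pre_ requires distinct keys: A's argument is a Python dict, whose keys are necessarily
-- distinct, so association lists with duplicate keys encode no dict input at all.
def Pre_align_size_of_virtual_table (virtual_table : List (String × List (Option Int))) : Prop :=
  (virtual_table.map Prod.fst).Nodup
instance (virtual_table : List (String × List (Option Int))) : Decidable (Pre_align_size_of_virtual_table virtual_table) := by unfold Pre_align_size_of_virtual_table; infer_instance
def pvWitness_align_size_of_virtual_table : (List (String × List (Option Int))) :=
  [("a", [some 1, none]), ("b", [some (-2)])]
def Spec_align_size_of_virtual_table (virtual_table : List (String × List (Option Int))) (out : List (String × List (Option Int))) : Prop := out = align_size_of_virtual_table_alt virtual_table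
instance (virtual_table : List (String × List (Option Int))) (out : List (String × List (Option Int))) : Decidable (Spec_align_size_of_virtual_table virtual_table out) := by unfold Spec_align_size_of_virtual_table; infer_instance

-- ===== CLAIM (what is proved, stated in full; the proofs are below) =====
def Claim_equal_align_size_of_virtual_table : Prop := ∀ (virtual_table : List (String × List (Option Int))), Dom_align_size_of_virtual_table virtual_table → Pre_align_size_of_virtual_table virtual_table → Spec_align_size_of_virtual_table virtual_table (align_size_of_virtual_table virtual_table)

-- ===== LEMMAS AND PROOFS =====

-- pad a column to (integer) length M
def padF (M : Int) (v : List (Option Int)) : List (Option Int) :=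
  v ++ List.replicate (M - (v.length : Int)).toNat none



lemma padF_of_len_eq (M : Int) (v : List (Option Int)) (h : (v.length : Int) = M) :
    padF M v = v := by
  simp [padF, h]

lemma loopA_items (M : Int) :
    ∀ (rest : List (String × Int)) (d : PySem.Dict String (List (Option Int))),
    d.keys.Nodup →
    (rest.map Prod.fst).Nodup →
    (∀ p ∈ rest, ∃ v, d.get? p.1 = some v ∧ (v.length : Int) = p.2 ∧ p.2 ≤ M) →
    (rest.foldl pvPadStep (d, some M)).1.items
      = d.items.map (fun q => if q.1 ∈ rest.map Prod.fst then (q.1, padF M q.2) else q) := by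
  intro rest
  induction rest with
  | nil => intro d _ _ _; simp
  | cons kv rest ih =>
    intro d hdk hnd hv
    obtain ⟨v, hget, hlen, hle⟩ := hv kv (List.mem_cons_self ..)
    have hgetD : d.getD kv.1 [] = v := by
      simp [PySem.Dict.getD, hget]
    have hcont : d.contains kv.1 = true := by
      rw [PySem.Dict.contains_eq_isSome_get?, hget]; rfl
    have hknotin : kv.1 ∉ rest.map Prod.fst := by
      simpa using (List.nodup_cons.mp hnd).1
    by_cases hlt : kv.2 < M
    · -- padding branch
      have hM0 : M ≠ 0 := by omega
      have hstep : pvPadStep (d, some M) kv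
          = (d.insert kv.1 (padF M v), some M) := by
        simp only [pvPadStep, PySem.List.len_eq, hlen, hM0, hlt, ne_eq,
          not_false_eq_true, if_true, PySem.Dict.modify, hgetD,
          PySem.List.pyRepeat_singleton]
        refine Prod.ext ?_ ?_
        · show d.insert kv.1 (v ++ List.replicate (M - kv.2).toNat none)
            = d.insert kv.1 (padF M v)
          simp [padF, hlen]
        · show some (PySem.List.len ((d.insert kv.1 (v ++ List.replicate (M - kv.2).toNat none)).getD kv.1 [])) = some M
          rw [PySem.Dict.getD_eq_get?_getD, PySem.Dict.get?_insert_self]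
          simp [PySem.List.len_eq]
          omega
      rw [List.foldl_cons, hstep, ih]
      · rw [PySem.Dict.items_insert_of_contains d (padF M v) hcont]
        rw [List.map_map]
        apply List.map_congr_left
        rintro ⟨q1, q2⟩ hq
        by_cases hqk : q1 = kv.1
        · have hq2 : q2 = v := by
            have h2 := PySem.Dict.get?_of_mem_items d (hqk ▸ hq) hdk
            rw [hget] at h2
            exact (Option.some.injEq _ _ ▸ h2).symm
          subst hqk hq2
          simp [Function.comp, hknotin]
        · have hm : (q1 ∈ kv.1 :: List.map Prod.fst rest) ↔ (q1 ∈ List.map Prod.fst rest) := by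
            simp [List.mem_cons, hqk]
          simp only [Function.comp_apply, List.map_cons]
          rw [if_neg (show ¬((q1 == kv.1) = true) by simp [hqk])]
          simp only [hm]
      · exact PySem.Dict.nodup_keys_insert _ _ _ hdk
      · exact (List.nodup_cons.mp hnd).2
      · intro p hp
        obtain ⟨w, hw, hwl, hwle⟩ := hv p (List.mem_cons_of_mem _ hp)
        refine ⟨w, ?_, hwl, hwle⟩
        rw [PySem.Dict.get?_insert_of_ne _ _ ?_, hw]
        intro h; exact hknotin (h ▸ List.mem_map_of_mem hp)
    · -- no-op branch: kv.2 = M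
      have heq : kv.2 = M := le_antisymm hle (not_lt.mp hlt)
      have hstep : pvPadStep (d, some M) kv = (d, some M) := by
        simp [pvPadStep, hgetD, PySem.List.len_eq, hlen, heq]
      rw [List.foldl_cons, hstep, ih d hdk (List.nodup_cons.mp hnd).2
        (fun p hp => hv p (List.mem_cons_of_mem _ hp))]
      apply List.map_congr_left
      rintro ⟨q1, q2⟩ hq
      by_cases hqk : q1 = kv.1
      · have hq2 : q2 = v := by
          have h2 := PySem.Dict.get?_of_mem_items d (hqk ▸ hq) hdk
          rw [hget] at h2
          exact (Option.some.injEq _ _ ▸ h2).symm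
        have hpad : padF M q2 = q2 := by
          rw [hq2]; unfold padF; rw [hlen, heq]; simp
        subst hqk
        simp [hknotin, hpad, List.mem_cons]
      · have hm : (q1 ∈ kv.1 :: List.map Prod.fst rest) ↔ (q1 ∈ List.map Prod.fst rest) := by
          simp [List.mem_cons, hqk]
        simp only [List.map_cons, hm]

-- A's result: once prev_length is the maximal length M, the loop pads every remaining
-- key's column to length M; B computes exactly that in one pass.
lemma align_eq_alt : ∀ vt : List (String × List (Option Int)), (vt.map Prod.fst).Nodup →
    align_size_of_virtual_table vt = align_size_of_virtual_table_alt vt := by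
  intro vt hnd
  unfold align_size_of_virtual_table align_size_of_virtual_table_alt
  simp only []
  set d0 : PySem.Dict String (List (Option Int)) := PySem.Dict.mk vt with hd0
  have hitems : d0.items = vt := rfl
  have hkeys : d0.keys = vt.map Prod.fst := by simp [PySem.Dict.keys, hitems]
  have hknd : d0.keys.Nodup := by rw [hkeys]; exact hnd
  set M : Int := PySem.List.maxD (vt.map (fun p => PySem.List.len p.2)) (fun x => x) 0 with hM
  -- the header list
  have hheader : d0.keys.foldl (fun acc k => acc ++ [(k, PySem.List.len (d0.getD k []))]) []
      = vt.map (fun p => (p.1, (p.2.length : Int))) := by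
    rw [PySem.List.foldl_append_singleton_eq_map]
    rw [hkeys, List.map_map, List.nil_append]
    apply List.map_congr_left
    rintro ⟨q1, q2⟩ hq
    have hg : d0.getD q1 [] = q2 :=
      PySem.Dict.getD_of_mem_items d0 (by rw [hitems]; exact hq) hknd []
    simp [Function.comp, hg, PySem.List.len_eq]
  rw [hheader]
  cases vt with
  | nil => rfl
  | cons p0 vt' =>
  set vt := p0 :: vt'
  rcases hhs : PySem.List.sorted (vt.map (fun p => (p.1, (p.2.length : Int)))) (fun x => x.2) true
    with _ | ⟨h0, t⟩
  · exact absurd ((PySem.List.sorted_eq_nil_iff _ _ _).mp hhs) (by simp)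
  have hperm : (h0 :: t).Perm (vt.map (fun p => (p.1, (p.2.length : Int)))) := by
    rw [← hhs]; exact PySem.List.sorted_perm _ _ _
  have hkeysperm : ((h0 :: t).map Prod.fst).Perm (vt.map Prod.fst) := by
    have := hperm.map Prod.fst
    rwa [List.map_map] at this
  have hhsnd : ((h0 :: t).map Prod.fst).Nodup := (hkeysperm.nodup_iff).mpr hnd
  -- the maximum
  have hlens : (vt.map (fun p => PySem.List.len p.2)) = (vt.map (fun p => (p.1, (p.2.length : Int)))).map Prod.snd := by
    rw [List.map_map]; apply List.map_congr_left; intro p _; simp [PySem.List.len_eq]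
  have hub : ∀ y ∈ vt.map (fun p => (p.1, (p.2.length : Int))), y.2 ≤ h0.2 :=
    PySem.List.key_head_sorted_rev_ge _ _ hhs
  have hh0mem : h0 ∈ vt.map (fun p => (p.1, (p.2.length : Int))) := hperm.mem_iff.mp (List.mem_cons_self ..)
  have hMh0 : h0.2 = M := by
    rcases hmax : PySem.List.max? (vt.map (fun p => PySem.List.len p.2)) (fun x => x) with _ | m
    · exact absurd ((PySem.List.max?_eq_none_iff _ _).mp hmax) (by simp)
    have hMm : M = m := by rw [hM, PySem.List.maxD, hmax]; rfl
    have h1 : h0.2 ≤ m := by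
      have : h0.2 ∈ vt.map (fun p => PySem.List.len p.2) := by
        rw [hlens]; exact List.mem_map_of_mem hh0mem
      exact PySem.List.max?_isMax hmax _ this
    have h2 : m ≤ h0.2 := by
      have hm2 := PySem.List.max?_mem hmax
      rw [hlens] at hm2
      obtain ⟨y, hy, hym⟩ := List.mem_map.mp hm2
      rw [← hym]; exact hub y hy
    omega
  have hget0 : ∀ q ∈ vt, d0.get? q.1 = some q.2 := by
    rintro ⟨q1, q2⟩ hq
    exact (PySem.Dict.get?_eq_some_iff_mem_items d0 q1 q2 hknd).mpr (by rw [hitems]; exact hq)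
  -- the first iteration sets prev_length to M
  have hfirst : pvPadStep (d0, none) h0 = (d0, some M) := by
    obtain ⟨q0, hq0, hq0e⟩ := List.mem_map.mp hh0mem
    have hg : d0.getD h0.1 [] = q0.2 := by
      rw [← hq0e]
      exact PySem.Dict.getD_of_mem_items d0 (by rw [hitems]; exact (Prod.mk.eta ▸ hq0)) hknd []
    have hlenM0 : ((d0.getD h0.1 []).length : Int) = M := by
      rw [hg, ← hMh0, ← hq0e]
    simp [pvPadStep, hlenM0]
  rw [hhs, List.foldl_cons, hfirst, loopA_items M t d0 hknd (List.nodup_cons.mp hhsnd).2 ?hv]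
  case hv =>
    intro p hp
    have hpmem : p ∈ vt.map (fun p => (p.1, (p.2.length : Int))) :=
      hperm.mem_iff.mp (List.mem_cons_of_mem _ hp)
    obtain ⟨q, hq, hqe⟩ := List.mem_map.mp hpmem
    refine ⟨q.2, ?_, ?_, ?_⟩
    · rw [← hqe]; exact hget0 q hq
    · rw [← hqe]
    · rw [← hMh0]
      exact hub p hpmem
  -- both sides are vt with every column padded to M
  rw [hitems]
  apply List.map_congr_left
  rintro ⟨q1, q2⟩ hq
  have hpadeq : (q1, q2 ++ PySem.List.pyRepeat [none] (M - PySem.List.len q2)) = (q1, padF M q2) := by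
    simp [padF, PySem.List.pyRepeat_singleton, PySem.List.len_eq]
  by_cases hmem : q1 ∈ t.map Prod.fst
  · simp only [hmem, if_true, hpadeq]
  · -- q1 is the head key: its column already has length M
    have : q1 ∈ (h0 :: t).map Prod.fst := by
      exact hkeysperm.symm.mem_iff.mp (List.mem_map_of_mem hq)
    have hq1h0 : q1 = h0.1 := by
      rcases (by simpa using this : q1 = h0.1 ∨ ∃ x, (q1, x) ∈ t) with h | ⟨x, hx⟩
      · exact h
      · exact absurd (List.mem_map_of_mem hx) hmem
    obtain ⟨q0, hq0, hq0e⟩ := List.mem_map.mp hh0mem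
    have hqq0 : (q1, q2) = q0 :=
      List.inj_on_of_nodup_map hnd hq hq0 (hq1h0.trans (congrArg Prod.fst hq0e).symm)
    have hlenM : (q2.length : Int) = M := by
      have : h0.2 = (q0.2.length : Int) := by rw [← hq0e]
      rw [← hqq0] at this
      simpa [← hMh0] using this.symm
    rw [hpadeq, if_neg hmem, padF_of_len_eq _ _ hlenM]

-- ===== VERDICT (by name: the statement is the Claim_ definition above) =====
theorem align_size_of_virtual_table_spec : Claim_equal_align_size_of_virtual_table := by
  intro virtual_table _ hpre
  exact align_eq_alt virtual_table hpre
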